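-- pv_equiv track=rewrite | github.com/Madu-de/LSD | v-0.0.6/display.py | range
-- ===== SOURCE A (Python) =====
-- def range(start,end):
-- 	result = []
-- 	increment = 1
-- 	if start > end:
-- 		increment = -1
-- 	while start != end:
-- 		result += [start]
-- 		start += increment
-- 	result += [start]
-- 	return result
-- ===== SOURCE B (Python) =====
-- def range(start, end):
--     lo, hi = (start, end) if start <= end else (end, start)
--     result = []
--     x = lo
--     while x <= hi:
--         result.append(x)
--         x += 1
--     if start > end:
--         result.reverse()
--     return result
-- ===== Notes on version B (the rewrite author's own statement) =====
-- stated objective: alternative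
-- what changed: B removes the direction-dependent increment: it always builds the ascending list from min(start,end) to max(start,end) and reverses it once when start > end, instead of A's signed-step walk from start to end.
import Mathlib
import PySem

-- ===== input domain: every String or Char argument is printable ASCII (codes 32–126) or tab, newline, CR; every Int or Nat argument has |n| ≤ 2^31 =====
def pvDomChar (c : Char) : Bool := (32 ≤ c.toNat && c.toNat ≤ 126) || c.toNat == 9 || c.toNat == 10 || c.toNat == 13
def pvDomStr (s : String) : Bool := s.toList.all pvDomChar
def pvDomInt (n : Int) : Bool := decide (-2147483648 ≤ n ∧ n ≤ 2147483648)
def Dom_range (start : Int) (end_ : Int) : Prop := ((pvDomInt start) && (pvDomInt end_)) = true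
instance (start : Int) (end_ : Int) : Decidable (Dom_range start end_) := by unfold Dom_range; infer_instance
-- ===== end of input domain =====

-- B builds the ascending list min..max and reverses once when start > end, instead of A's
-- signed-increment walk from start to end; same cost, different decomposition ("alternative").

-- ===== PORT A =====
-- while start != end: result += [start]; start += increment  — fuel = |end - start| bounds the loop
def rangeLoopA : Nat → Int → Int → Int → List Int → List Int
  | 0, s, _, _, res => res ++ [s]
  | f + 1, s, e, inc, res =>
      if s ≠ e then rangeLoopA f (s + inc) e inc (res ++ [s])
      else res ++ [s]

def range (start : Int) (end_ : Int) : List Int :=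
  let increment : Int := if start > end_ then -1 else 1
  rangeLoopA (end_ - start).natAbs start end_ increment []

-- ===== PORT B =====
-- while x <= hi: result.append(x); x += 1  — fuel = |hi - lo| + 1 bounds the loop
def ascLoopB : Nat → Int → Int → List Int → List Int
  | 0, _, _, res => res
  | f + 1, x, hi, res =>
      if x ≤ hi then ascLoopB f (x + 1) hi (res ++ [x])
      else res

def range_alt (start : Int) (end_ : Int) : List Int :=
  let lo := min start end_
  let hi := max start end_
  let asc := ascLoopB ((hi - lo).natAbs + 1) lo hi []
  if start > end_ then asc.reverse else asc

-- ===== PRECONDITION & SPEC =====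
def Spec_range (start : Int) (end_ : Int) (out : List Int) : Prop := out = range_alt start end_
instance (start : Int) (end_ : Int) (out : List Int) : Decidable (Spec_range start end_ out) := by unfold Spec_range; infer_instance

-- ===== CLAIM (what is proved, stated in full; the proofs are below) =====
def Claim_equal_range : Prop := ∀ (start : Int) (end_ : Int), Dom_range start end_ → Spec_range start end_ (range start end_)

-- ===== LEMMAS AND PROOFS =====

theorem rangeLoopA_up (n : Nat) : ∀ (s : Int) (res : List Int),
    rangeLoopA n s (s + n) 1 res = res ++ (List.range (n + 1)).map (fun i : Nat => s + (i : Int)) := by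
  induction n with
  | zero => intro s res; simp [rangeLoopA]
  | succ m ih =>
      intro s res
      rw [rangeLoopA, if_pos (by push_cast; omega : s ≠ s + ((m + 1 : Nat) : Int)),
        show s + ((m + 1 : Nat) : Int) = (s + 1) + (m : Nat) by push_cast; ring,
        ih (s + 1) (res ++ [s])]
      simp [List.range_succ_eq_map, Function.comp_def]
      intro a _; ring

theorem rangeLoopA_down (n : Nat) : ∀ (s : Int) (res : List Int),
    rangeLoopA n s (s - n) (-1) res = res ++ (List.range (n + 1)).map (fun i : Nat => s - (i : Int)) := by
  induction n with
  | zero => intro s res; simp [rangeLoopA]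
  | succ m ih =>
      intro s res
      rw [rangeLoopA, if_pos (by push_cast; omega : s ≠ s - ((m + 1 : Nat) : Int)),
        show s - ((m + 1 : Nat) : Int) = (s + -1) - (m : Nat) by push_cast; ring,
        ih (s + -1) (res ++ [s])]
      simp [List.range_succ_eq_map, Function.comp_def]
      exact ⟨by ring, fun a _ => by ring⟩

theorem ascLoopB_run (n : Nat) : ∀ (lo hi : Int) (res : List Int), hi = lo + n →
    ascLoopB (n + 1) lo hi res = res ++ (List.range (n + 1)).map (fun i : Nat => lo + (i : Int)) := by
  induction n with
  | zero => intro lo hi res h; subst h; simp [ascLoopB]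
  | succ m ih =>
      intro lo hi res h; subst h
      rw [ascLoopB, if_pos (by push_cast; omega : lo ≤ lo + ((m + 1 : Nat) : Int)),
        ih (lo + 1) (lo + ((m + 1 : Nat) : Int)) (res ++ [lo]) (by push_cast; ring)]
      simp [List.range_succ_eq_map, Function.comp_def]
      intro a _; ring

theorem reverse_asc (n : Nat) (e : Int) :
    ((List.range (n + 1)).map (fun i : Nat => e + (i : Int))).reverse
      = (List.range (n + 1)).map (fun i : Nat => (e + (n : Int)) - (i : Int)) := by
  apply List.ext_getElem
  · simp
  · intro i h1 h2
    simp only [List.length_map, List.length_range] at h1 h2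
    simp only [List.getElem_reverse, List.getElem_map, List.getElem_range,
      List.length_map, List.length_range]
    have : (n + 1 - 1 - i : Nat) = n - i := by omega
    rw [this]
    have : ((n - i : Nat) : Int) = (n : Int) - i := by omega
    rw [this]; ring

theorem range_spec : Claim_equal_range := by
  intro start end_ _
  unfold Spec_range range range_alt
  by_cases h : start > end_
  · -- descending: A walks down, B builds ascending from end_ and reverses
    have hmin : min start end_ = end_ := by omega
    have hmax : max start end_ = start := by omega
    simp only [if_pos h, gt_iff_lt, hmin, hmax]
    obtain ⟨n, he⟩ : ∃ n : Nat, end_ = start - (n : Int) :=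
      ⟨(start - end_).natAbs, by omega⟩
    subst he
    have h1 : (start - (n : Int) - start).natAbs = n := by omega
    have h2 : (start - (start - (n : Int))).natAbs = n := by omega
    rw [h1, h2, rangeLoopA_down]
    rw [ascLoopB_run n (start - (n : Int)) start [] (by ring),
      List.nil_append, List.nil_append, reverse_asc]
    apply List.map_congr_left; intro i _
    ring
  · -- ascending (or equal)
    have hmin : min start end_ = start := by omega
    have hmax : max start end_ = end_ := by omega
    simp only [if_neg h, gt_iff_lt, hmin, hmax]
    obtain ⟨n, he⟩ : ∃ n : Nat, end_ = start + (n : Int) :=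
      ⟨(end_ - start).natAbs, by omega⟩
    subst he
    have h1 : (start + (n : Int) - start).natAbs = n := by omega
    rw [h1, rangeLoopA_up, ascLoopB_run n start (start + (n : Int)) [] rfl]
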